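-- pv_equiv track=rewrite | github.com/alexwday/iris-project-database-refresh | semantic search/stage2_5_page_boundary_correction.py | group_sections_by_chapter
-- ===== SOURCE A (Python) =====
-- from typing import List, Dict, Tuple, Optional, Set
-- from collections import defaultdict
--
-- def group_sections_by_chapter(sections: List[Dict]) -> Dict[int, List[Dict]]:
--     """Group sections by chapter number."""
--     chapters = defaultdict(list)
--
--     for section in sections:
--         chapter_num = section.get('chapter_number')
--         if chapter_num is not None:
--             chapters[chapter_num].append(section)
--
--     # Sort sections within each chapter
--     for chapter_num in chapters:
--         chapters[chapter_num].sort(key=lambda x: x.get('section_number', 0))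
--
--     return dict(chapters)
-- ===== SOURCE B (Python) =====
-- def group_sections_by_chapter(sections):
--     """Group sections by chapter number: per-chapter filter over one prefiltered list."""
--     with_ch = [s for s in sections if s.get('chapter_number') is not None]
--     keys = list(dict.fromkeys(s['chapter_number'] for s in with_ch))
--     return {c: sorted((s for s in with_ch if s['chapter_number'] == c),
--                       key=lambda s: s.get('section_number', 0))
--             for c in keys}
-- ===== Notes on version B (the rewrite author's own statement) =====
-- stated objective: alternative
-- what changed: A builds buckets incrementally in a defaultdict and then destructively sorts each bucket in a second keys pass; B prefilters once, takes the ordered-distinct chapter keys, and builds the result dict by a per-key filter-and-sort comprehension, never mutating a bucket.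
import Mathlib
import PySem

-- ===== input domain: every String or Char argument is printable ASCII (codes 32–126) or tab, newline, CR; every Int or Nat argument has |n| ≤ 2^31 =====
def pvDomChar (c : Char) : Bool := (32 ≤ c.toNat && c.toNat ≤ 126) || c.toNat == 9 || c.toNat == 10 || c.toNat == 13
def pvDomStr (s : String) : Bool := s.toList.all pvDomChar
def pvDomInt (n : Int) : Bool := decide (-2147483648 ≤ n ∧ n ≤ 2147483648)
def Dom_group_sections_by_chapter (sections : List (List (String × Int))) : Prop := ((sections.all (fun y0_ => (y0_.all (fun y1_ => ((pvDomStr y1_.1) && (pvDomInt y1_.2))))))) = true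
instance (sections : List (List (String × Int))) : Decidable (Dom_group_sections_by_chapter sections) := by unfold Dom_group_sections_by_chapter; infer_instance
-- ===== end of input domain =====

-- B replaces A's bucket-then-sort-in-place loops by one prefilter plus a per-key
-- filter-and-sort comprehension over the ordered distinct chapter keys (alternative
-- decomposition, same behaviour).

-- ===== PORT A =====
-- section.get('chapter_number') / section.get('section_number', 0)
def pvGetCh (sec : List (String × Int)) : Option Int :=
  (PySem.Dict.mk sec).get? "chapter_number"
def pvSecKey (sec : List (String × Int)) : Int :=
  (PySem.Dict.mk sec).getD "section_number" 0

def group_sections_by_chapter (sections : List (List (String × Int))) : List (Int × List (List (String × Int))) :=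
  let chapters := sections.foldl (fun d sec =>
      match pvGetCh sec with
      | some c => d.modify c [] (· ++ [sec])
      | none => d) PySem.Dict.empty
  let chapters2 := chapters.keys.foldl (fun d c =>
      d.insert c (PySem.List.sorted (d.getD c []) pvSecKey false)) chapters
  chapters2.items

-- ===== PORT B =====
def group_sections_by_chapter_alt (sections : List (List (String × Int))) : List (Int × List (List (String × Int))) :=
  let withCh := sections.filter (fun s => (pvGetCh s).isSome)
  let keys := PySem.List.dedup (withCh.map (fun s => (pvGetCh s).getD 0))
  keys.map (fun c =>
    (c, PySem.List.sorted (withCh.filter (fun s => (pvGetCh s).getD 0 == c)) pvSecKey false))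

-- ===== PRECONDITION & SPEC =====
def Spec_group_sections_by_chapter (sections : List (List (String × Int))) (out : List (Int × List (List (String × Int)))) : Prop := out = group_sections_by_chapter_alt sections
instance (sections : List (List (String × Int))) (out : List (Int × List (List (String × Int)))) : Decidable (Spec_group_sections_by_chapter sections out) := by unfold Spec_group_sections_by_chapter; infer_instance

-- ===== CLAIM (what is proved, stated in full; the proofs are below) =====
def Claim_equal_group_sections_by_chapter : Prop := ∀ (sections : List (List (String × Int))), Dom_group_sections_by_chapter sections → Spec_group_sections_by_chapter sections (group_sections_by_chapter sections)

-- ===== LEMMAS AND PROOFS =====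

-- A's grouping loop, restricted to the sections that carry a chapter key and
-- re-expressed as a fold over (chapter, section) pairs.
theorem pv_foldA_eq (l : List (List (String × Int))) (d : PySem.Dict Int (List (List (String × Int)))) :
    l.foldl (fun d sec => match pvGetCh sec with
      | some c => d.modify c [] (· ++ [sec])
      | none => d) d
  = ((l.filter (fun s => (pvGetCh s).isSome)).map (fun s => ((pvGetCh s).getD 0, s))).foldl
      (fun d p => d.modify p.1 [] (· ++ [p.2])) d := by
  induction l generalizing d with
  | nil => rfl
  | cons s t ih =>
    cases h : pvGetCh s with
    | none => simp [List.foldl_cons, h, ih]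
    | some c => simp [List.foldl_cons, h, ih]

-- A's per-chapter sorting loop: lookup after the loop.
theorem pv_getD_loop2 (ks : List Int) (d : PySem.Dict Int (List (List (String × Int))))
    (hnd : ks.Nodup) (c : Int) :
    (ks.foldl (fun d c => d.insert c (PySem.List.sorted (d.getD c []) pvSecKey false)) d).getD c []
  = if c ∈ ks then PySem.List.sorted (d.getD c []) pvSecKey false else d.getD c [] := by
  induction ks generalizing d with
  | nil => simp
  | cons k t ih =>
    simp only [List.foldl_cons]
    rw [ih _ (List.nodup_cons.mp hnd).2]
    by_cases hc : c = k
    · subst hc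
      have : c ∉ t := (List.nodup_cons.mp hnd).1
      simp [this, PySem.Dict.getD_insert_self]
    · rw [PySem.Dict.getD_insert_of_ne _ _ _ hc]
      simp [List.mem_cons, hc]

-- A's per-chapter sorting loop only overwrites existing keys, so keys are unchanged.
theorem pv_keys_loop2 (ks : List Int) (d : PySem.Dict Int (List (List (String × Int))))
    (h : ∀ c ∈ ks, d.contains c = true) :
    (ks.foldl (fun d c => d.insert c (PySem.List.sorted (d.getD c []) pvSecKey false)) d).keys = d.keys := by
  induction ks generalizing d with
  | nil => rfl
  | cons k t ih =>
    simp only [List.foldl_cons]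
    rw [ih]
    · exact PySem.Dict.keys_insert_of_contains _ _ (h k (by simp))
    · intro c hc
      rw [PySem.Dict.contains_insert]
      simp [h c (List.mem_cons_of_mem _ hc)]

-- A's bucket content is B's filter.
theorem pv_bucket_filter (l : List (List (String × Int))) (c : Int) :
    (((l.map (fun s => ((pvGetCh s).getD 0, s))).filter (fun p => p.1 == c)).map (·.2))
  = l.filter (fun s => (pvGetCh s).getD 0 == c) := by
  rw [List.filter_map, List.map_map]
  have h1 : ((fun p : Int × List (String × Int) => p.1 == c) ∘ fun s : List (String × Int) => ((pvGetCh s).getD 0, s))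
      = fun s : List (String × Int) => (pvGetCh s).getD 0 == c := rfl
  have h2 : ((fun x : Int × List (String × Int) => x.2) ∘ fun s : List (String × Int) => ((pvGetCh s).getD 0, s))
      = id := rfl
  rw [h1, h2, List.map_id]

theorem pv_main (sections : List (List (String × Int))) :
    group_sections_by_chapter sections = group_sections_by_chapter_alt sections := by
  unfold group_sections_by_chapter group_sections_by_chapter_alt
  simp only []
  rw [pv_foldA_eq]
  set withCh := sections.filter (fun s => (pvGetCh s).isSome) with hw
  set pairs := withCh.map (fun s => ((pvGetCh s).getD 0, s)) with hp
  set d1 := pairs.foldl (fun d p => d.modify p.1 [] (· ++ [p.2])) PySem.Dict.empty with hd1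
  have hkeys1 : d1.keys = PySem.List.dedup (withCh.map (fun s => (pvGetCh s).getD 0)) := by
    rw [hd1, hp, PySem.Dict.keys_foldl_modify_key _ Prod.fst [] (fun _ p => (· ++ [p.2]))]
    simp only [PySem.Dict.keys_empty, PySem.Set.update_nil_left, List.map_map]
    rw [PySem.List.dedup_eq_ofList]
    rfl
  have hnd : d1.keys.Nodup := by
    rw [hkeys1]; exact PySem.List.nodup_dedup _
  have hgd1 : ∀ c : Int, d1.getD c [] = withCh.filter (fun s => (pvGetCh s).getD 0 == c) := by
    intro c
    rw [hd1, PySem.Dict.getD_foldl_modify_append, PySem.Dict.getD_empty, List.nil_append, hp,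
      pv_bucket_filter]
  set d2 := d1.keys.foldl (fun d c => d.insert c (PySem.List.sorted (d.getD c []) pvSecKey false)) d1 with hd2
  have hkeys2 : d2.keys = d1.keys := by
    rw [hd2]
    exact pv_keys_loop2 _ _ (fun c hc => (PySem.Dict.contains_iff_mem_keys _ _).mpr hc)
  have hitems : d2.items = d2.keys.map (fun c => (c, d2.getD c [])) :=
    PySem.Dict.items_eq_map_keys d2 (hkeys2 ▸ hnd) []
  rw [hitems, hkeys2, hkeys1]
  apply List.map_congr_left
  intro c hc
  have hcmem : c ∈ d1.keys := by rw [hkeys1]; exact hc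
  have : d2.getD c [] = PySem.List.sorted (d1.getD c []) pvSecKey false := by
    rw [hd2, pv_getD_loop2 _ _ hnd]
    simp [hcmem]
  rw [this, hgd1]

-- ===== VERDICT (by name: the statement is the Claim_ definition above) =====
theorem group_sections_by_chapter_spec : Claim_equal_group_sections_by_chapter := by
  intro sections _
  exact pv_main sections
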